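-- pv_equiv track=rewrite | github.com/xeekatar/python | inclass1.py | findOdds
-- ===== SOURCE A (Python) =====
-- def findOdds (num1, num2):
--     c = ()
--     for i in range(num1, num2 + 1):
--         if i % 2 != 0:
--             c += (i,)
--         if i % 2 == 0:
--             pass
--     return c
-- ===== SOURCE B (Python) =====
-- def findOdds(num1, num2):
--     start = num1 if num1 % 2 != 0 else num1 + 1
--     return tuple(range(start, num2 + 1, 2))
-- ===== Notes on version B (the rewrite author's own statement) =====
-- stated objective: idiomatic
-- what changed: Instead of scanning every integer in the range and testing parity, B computes the first odd value and builds the result directly with a step-2 range, visiting only the odd numbers.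
import Mathlib
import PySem

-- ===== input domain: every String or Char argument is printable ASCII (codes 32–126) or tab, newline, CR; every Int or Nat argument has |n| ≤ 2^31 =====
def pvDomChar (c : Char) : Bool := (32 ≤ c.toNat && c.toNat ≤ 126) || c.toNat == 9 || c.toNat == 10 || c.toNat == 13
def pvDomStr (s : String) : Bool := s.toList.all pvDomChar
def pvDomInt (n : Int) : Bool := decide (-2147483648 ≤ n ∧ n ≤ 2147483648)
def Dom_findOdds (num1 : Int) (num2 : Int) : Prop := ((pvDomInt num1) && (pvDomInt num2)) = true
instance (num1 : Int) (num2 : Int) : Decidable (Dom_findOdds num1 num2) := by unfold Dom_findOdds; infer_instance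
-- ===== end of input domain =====

-- B replaces the per-element parity filter with a direct step-2 range starting at the first odd value (idiomatic rewrite).


-- ===== PORT A =====
-- for i in range(num1, num2+1): if i % 2 != 0: c += (i,); if i % 2 == 0: pass
def findOdds (num1 : Int) (num2 : Int) : List Int :=
  (PySem.List.pyRange num1 (num2 + 1) 1).foldl
    (fun c i =>
      if PySem.Int.mod i 2 ≠ 0 then c ++ [i]
      else if PySem.Int.mod i 2 = 0 then c else c) []

-- ===== PORT B =====
-- start = num1 if num1 % 2 != 0 else num1 + 1; return tuple(range(start, num2 + 1, 2))
def findOdds_alt (num1 : Int) (num2 : Int) : List Int :=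
  let start := if PySem.Int.mod num1 2 ≠ 0 then num1 else num1 + 1
  PySem.List.pyRange start (num2 + 1) 2

-- ===== PRECONDITION & SPEC =====
def Spec_findOdds (num1 : Int) (num2 : Int) (out : List Int) : Prop := out = findOdds_alt num1 num2
instance (num1 : Int) (num2 : Int) (out : List Int) : Decidable (Spec_findOdds num1 num2 out) := by unfold Spec_findOdds; infer_instance

-- ===== CLAIM (what is proved, stated in full; the proofs are below) =====
def Claim_equal_findOdds : Prop := ∀ (num1 : Int) (num2 : Int), Dom_findOdds num1 num2 → Spec_findOdds num1 num2 (findOdds num1 num2)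

-- ===== LEMMAS AND PROOFS =====

lemma pymod_two_eq_emod (a : Int) : PySem.Int.mod a 2 = a % 2 := by
  show a.fmod 2 = a % 2
  rw [Int.fmod_eq_emod]
  simp

lemma pyRange_two_nil (a b : Int) (h : b ≤ a) : PySem.List.pyRange a b 2 = [] := by
  rw [PySem.List.pyRange_of_pos a b (by norm_num : (0:Int) < 2)]
  rw [if_neg (by omega)]
  simp

lemma pyRange_two_cons (a b : Int) (h : a < b) :
    PySem.List.pyRange a b 2 = a :: PySem.List.pyRange (a + 2) b 2 := by
  rw [PySem.List.pyRange_of_pos a b (by norm_num : (0:Int) < 2),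
      PySem.List.pyRange_of_pos (a + 2) b (by norm_num : (0:Int) < 2)]
  rw [if_pos h]
  by_cases h2 : a + 2 < b
  · rw [if_pos h2]
    have hn : ((b - a + 2 - 1) / 2).toNat = ((b - (a + 2) + 2 - 1) / 2).toNat + 1 := by
      omega
    rw [hn, List.range_succ_eq_map]
    simp [List.map_map, Function.comp]
    intro k _
    ring
  · rw [if_neg h2]
    have hn : ((b - a + 2 - 1) / 2).toNat = 1 := by omega
    rw [hn]
    simp

-- the loop of A computes the filter of the full range; that filter is the step-2 range from the first odd value
lemma filter_odd_range (n : Nat) : ∀ (a b : Int), (b - a).toNat = n →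
    (PySem.List.pyRange a b 1).filter (fun i => decide (PySem.Int.mod i 2 ≠ 0)) =
      PySem.List.pyRange (if PySem.Int.mod a 2 ≠ 0 then a else a + 1) b 2 := by
  induction n with
  | zero =>
    intro a b hn
    have hba : b ≤ a := by omega
    rw [PySem.List.pyRange_one_eq_nil hba]
    by_cases h : PySem.Int.mod a 2 ≠ 0
    · rw [if_pos h, pyRange_two_nil _ _ hba]; rfl
    · rw [if_neg h, pyRange_two_nil _ _ (by omega)]; rfl
  | succ m ih =>
    intro a b hn
    have hab : a < b := by omega
    rw [PySem.List.pyRange_one_cons hab, List.filter_cons,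
        ih (a + 1) b (by omega)]
    rw [pymod_two_eq_emod a, pymod_two_eq_emod (a + 1)]
    by_cases hpar : a % 2 = 0
    · have h1 : (a + 1) % 2 ≠ 0 := by omega
      simp only [hpar, if_pos h1]
      simp
    · have h1 : ¬ ((a + 1) % 2 ≠ 0) := by omega
      simp only [if_neg h1, if_pos hpar]
      have hcons := pyRange_two_cons a b hab
      simp only [decide_eq_true_eq]
      rw [if_pos hpar, hcons]
      have h2 : a + 1 + 1 = a + 2 := by ring
      rw [h2]

-- ===== VERDICT (by name: the statement is the Claim_ definition above) =====
theorem findOdds_spec : Claim_equal_findOdds := by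
  intro num1 num2 _
  show findOdds num1 num2 = findOdds_alt num1 num2
  unfold findOdds findOdds_alt
  simp only [ite_self]
  rw [PySem.List.foldl_append_ite_eq_filter]
  simpa using filter_odd_range (num2 + 1 - num1).toNat num1 (num2 + 1) rfl
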